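-- pv_equiv track=rewrite | github.com/mportesdev/adventofcode2019 | puzzle_6.py | steps_to_child
-- ===== SOURCE A (Python) =====
-- def steps_to_child(data_dict, obj_from, wanted_child):
--     # if not in keys, has no child objects at all
--     if obj_from not in data_dict:
--         return -1
--
--     if wanted_child in data_dict[obj_from]:
--         return 1
--
--     for child in data_dict[obj_from]:
--         steps = steps_to_child(data_dict, child, wanted_child)
--         if steps != -1:
--             return 1 + steps
--
--     return -1
-- ===== SOURCE B (Python) =====
-- def steps_to_child(data_dict, obj_from, wanted_child):
--     # Iterative DFS with an explicit stack of (node, distance) pairs.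
--     stack = [(obj_from, 0)]
--     while stack:
--         node, dist = stack.pop()
--         children = data_dict.get(node)
--         if children is None:
--             continue
--         if wanted_child in children:
--             return dist + 1
--         for child in reversed(children):
--             stack.append((child, dist + 1))
--     return -1
-- ===== Notes on version B (the rewrite author's own statement) =====
-- stated objective: alternative
-- what changed: The recursive depth-first search is replaced by an iterative traversal driven by an explicit stack of (node, distance) pairs (children pushed in reverse so the visit order and hence the returned distance are identical).
-- outside the precondition, e.g. on steps_to_child({'A': ['B', 'C'], 'C': ['C']}, 'A', 'B'): A returns 1, B returns 1
import Mathlib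
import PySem

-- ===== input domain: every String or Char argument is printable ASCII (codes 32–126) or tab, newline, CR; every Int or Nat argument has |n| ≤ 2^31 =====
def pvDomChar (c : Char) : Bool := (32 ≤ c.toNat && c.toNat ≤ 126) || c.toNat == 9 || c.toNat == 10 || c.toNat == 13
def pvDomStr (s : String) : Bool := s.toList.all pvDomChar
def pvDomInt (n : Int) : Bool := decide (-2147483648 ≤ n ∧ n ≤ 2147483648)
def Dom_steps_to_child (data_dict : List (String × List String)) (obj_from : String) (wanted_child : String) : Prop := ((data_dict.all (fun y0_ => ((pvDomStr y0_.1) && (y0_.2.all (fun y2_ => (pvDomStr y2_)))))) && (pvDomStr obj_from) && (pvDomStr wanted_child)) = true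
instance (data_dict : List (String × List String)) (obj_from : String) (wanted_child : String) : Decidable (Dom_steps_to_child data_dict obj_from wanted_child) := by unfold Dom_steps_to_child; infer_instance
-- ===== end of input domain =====

-- B replaces A's recursive depth-first search by an iterative traversal with an explicit
-- stack of (node, distance) pairs; same visit order and value (objective: alternative).


-- ===== PORT A =====
-- dict lookup, first match (the assoc-list convention for Python dicts)
def pvGet (d : List (String × List String)) (n : String) : Option (List String) :=
  (PySem.Dict.mk d).get? n

-- fuel-indexed transliteration of A's recursion (fuel d.length + 1 suffices on every input
-- admitted by Pre_, proved below); the for-loop with early return is the helper stepsAFold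
mutual
def stepsA (d : List (String × List String)) (w : String) : Nat → String → Int
  | 0, _ => -1
  | F + 1, n =>
    match pvGet d n with
    | none => -1                        -- if obj_from not in data_dict: return -1
    | some cs =>
      if w ∈ cs then 1                  -- if wanted_child in data_dict[obj_from]: return 1
      else stepsAFold d w F cs
termination_by F n => (F, 0)

def stepsAFold (d : List (String × List String)) (w : String) : Nat → List String → Int
  | _, [] => -1                         -- return -1 after the loop
  | F, c :: cs =>                       -- steps = steps_to_child(data_dict, child, wanted_child)
    let s := stepsA d w F c
    if s ≠ -1 then 1 + s else stepsAFold d w F cs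
termination_by F cs => (F, cs.length + 1)
end

def steps_to_child (data_dict : List (String × List String)) (obj_from : String) (wanted_child : String) : Int :=
  stepsA data_dict wanted_child (data_dict.length + 1) obj_from

-- ===== PORT B =====
-- total number of child entries; (pvM d + 1) ^ (d.length + 1) bounds the number of loop
-- iterations of Source B's stack loop on every input admitted by Pre_ (proved below) — this
-- fuel is for totalisation only, the loop itself is Source B's while loop step for step
def pvM (d : List (String × List String)) : Nat := (d.map (fun p => p.2.length)).sum

-- the while loop; the stack is kept top-first, so Python's
-- "for child in reversed(children): stack.append(…)" is the reverse.foldl cons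
def stepsBLoop (d : List (String × List String)) (w : String) : Nat → List (String × Int) → Int
  | 0, _ => -1
  | _ + 1, [] => -1                                    -- while stack exhausted: return -1
  | F + 1, (n, dist) :: rest =>                        -- node, dist = stack.pop()
    match pvGet d n with
    | none => stepsBLoop d w F rest                    -- continue
    | some cs =>
      if w ∈ cs then dist + 1                          -- return dist + 1
      else stepsBLoop d w F (cs.reverse.foldl (fun st c => (c, dist + 1) :: st) rest)

def steps_to_child_alt (data_dict : List (String × List String)) (obj_from : String) (wanted_child : String) : Int :=
  stepsBLoop data_dict wanted_child ((pvM data_dict + 1) ^ (data_dict.length + 1)) [(obj_from, 0)]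

-- ===== PRECONDITION & SPEC =====
-- children of a node ([] when the node is no key)
def pvChildren (d : List (String × List String)) (n : String) : List String :=
  (pvGet d n).getD []

def pvStep (d : List (String × List String)) (S : List String) : List String :=
  S.flatMap (pvChildren d)

-- pvR d t a = every node reachable from a along 1 .. t+1 child edges (iterated closure)
def pvR (d : List (String × List String)) : Nat → String → List String
  | 0, a => pvChildren d a
  | t + 1, a => (pvR d t a ++ pvStep d (pvR d t a)).dedup

-- Pre_ excludes exactly the inputs whose child graph has a cycle reachable from obj_from:
-- on those A's recursion is unbounded (RecursionError); A can still RETURN on a few of them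
-- (target found before the cycle is explored) — those are excluded too (see cites).
def Pre_steps_to_child (data_dict : List (String × List String)) (obj_from : String) (wanted_child : String) : Prop :=
  obj_from ∉ pvR data_dict data_dict.length obj_from ∧
  ∀ x ∈ pvR data_dict data_dict.length obj_from, x ∉ pvR data_dict data_dict.length x

instance (data_dict : List (String × List String)) (obj_from : String) (wanted_child : String) : Decidable (Pre_steps_to_child data_dict obj_from wanted_child) := by unfold Pre_steps_to_child; infer_instance

def pvWitness_steps_to_child : (List (String × List String)) × String × String :=
  ([("COM", ["B"]), ("B", ["C"])], "COM", "C")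

def Spec_steps_to_child (data_dict : List (String × List String)) (obj_from : String) (wanted_child : String) (out : Int) : Prop := out = steps_to_child_alt data_dict obj_from wanted_child
instance (data_dict : List (String × List String)) (obj_from : String) (wanted_child : String) (out : Int) : Decidable (Spec_steps_to_child data_dict obj_from wanted_child out) := by unfold Spec_steps_to_child; infer_instance

-- ===== CLAIM (what is proved, stated in full; the proofs are below) =====
def Claim_equal_steps_to_child : Prop := ∀ (data_dict : List (String × List String)) (obj_from : String) (wanted_child : String), Dom_steps_to_child data_dict obj_from wanted_child → Pre_steps_to_child data_dict obj_from wanted_child → Spec_steps_to_child data_dict obj_from wanted_child (steps_to_child data_dict obj_from wanted_child)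

-- ===== LEMMAS AND PROOFS =====

-- pvSafe d k n: every chain of child edges from n passes through at most k dict keys
def pvSafe (d : List (String × List String)) : Nat → String → Prop
  | 0, n => pvGet d n = none
  | k + 1, n => ∀ c ∈ pvChildren d n, pvSafe d k c

-- pvIsPath d a l b: a steps along child edges through the successive nodes l, ending at b
def pvIsPath (d : List (String × List String)) : String → List String → String → Prop
  | a, [], b => a = b
  | a, x :: l, b => x ∈ pvChildren d a ∧ pvIsPath d x l b

theorem pvSafe_mono (d : List (String × List String)) :
    ∀ k n, pvSafe d k n → pvSafe d (k + 1) n := by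
  intro k
  induction k with
  | zero =>
    intro n h c hc
    simp only [pvSafe] at h
    simp [pvChildren, h] at hc
  | succ k ih => intro n h c hc; exact ih c (h c hc)

theorem pvSafe_le (d : List (String × List String)) {k k' : Nat} (h : k ≤ k') :
    ∀ n, pvSafe d k n → pvSafe d k' n := by
  induction h with
  | refl => exact fun n h => h
  | step _ ih => exact fun n h => pvSafe_mono d _ n (ih n h)

theorem stepsAFold_congr (d : List (String × List String)) (w : String) (F k : Nat)
    (cs : List String) (h : ∀ c ∈ cs, stepsA d w F c = stepsA d w k c) :
    stepsAFold d w F cs = stepsAFold d w k cs := by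
  induction cs with
  | nil => simp [stepsAFold]
  | cons c cs ih =>
    simp only [stepsAFold, h c (by simp)]
    exact if_congr Iff.rfl rfl (ih (fun c hc => h c (by simp [hc])))

theorem stepsA_stab (d : List (String × List String)) (w : String) :
    ∀ k F n, pvSafe d k n → k ≤ F → stepsA d w F n = stepsA d w k n := by
  intro k
  induction k with
  | zero =>
    intro F n hs _
    cases F with
    | zero => rfl
    | succ F => simp only [pvSafe] at hs; simp [stepsA, hs]
    
  | succ k ih =>
    intro F n hs hF
    obtain ⟨F, rfl⟩ : ∃ F', F = F' + 1 := ⟨F - 1, by omega⟩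
    simp only [stepsA]
    cases hget : pvGet d n with
    | none => rfl
    | some cs =>
      by_cases hw : w ∈ cs
      · simp [hw]
      · simp only [hw, if_false]
        refine stepsAFold_congr d w F k cs (fun c hc => ?_)
        exact ih F c (hs c (by simp [pvChildren, hget, hc])) (by omega)

theorem stepsAFold_values (d : List (String × List String)) (w : String) (F : Nat)
    (h : ∀ n, stepsA d w F n = -1 ∨ 1 ≤ stepsA d w F n) :
    ∀ cs, stepsAFold d w F cs = -1 ∨ 1 ≤ stepsAFold d w F cs := by
  intro cs
  induction cs with
  | nil => left; simp [stepsAFold]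
  | cons c cs ih =>
    simp only [stepsAFold]
    by_cases hc : stepsA d w F c = -1
    · rw [if_neg (by simp [hc])]; exact ih
    · rcases h c with h1 | h1
      · exact absurd h1 hc
      · right; rw [if_pos hc]; omega

theorem stepsA_values (d : List (String × List String)) (w : String) :
    ∀ F n, stepsA d w F n = -1 ∨ 1 ≤ stepsA d w F n := by
  intro F
  induction F with
  | zero => intro n; left; simp [stepsA]
  | succ F ih =>
    intro n
    simp only [stepsA]
    cases hget : pvGet d n with
    | none => left; rfl
    | some cs =>
      by_cases hw : w ∈ cs
      · right; simp [hw]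
      · simp only [hw, if_false]
        exact stepsAFold_values d w F ih cs


-- unfolding of stepsA at the stabilised fuel d.length + 1
theorem stepsA_unfold_safe (d : List (String × List String)) (w : String) (n : String)
    (hs : pvSafe d (d.length + 1) n) :
    stepsA d w (d.length + 1) n =
      (match pvGet d n with
       | none => -1
       | some cs => if w ∈ cs then 1 else stepsAFold d w (d.length + 1) cs) := by
  have h := stepsA_stab d w (d.length + 1) (d.length + 2) n hs (by omega)
  rw [← h]
  simp only [stepsA]

-- ----- paths and reachability -----

theorem pvIsPath_snoc (d : List (String × List String)) :
    ∀ l a b c, pvIsPath d a l b → c ∈ pvChildren d b → pvIsPath d a (l ++ [c]) c := by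
  intro l
  induction l with
  | nil => intro a b c h hc; cases h; exact ⟨hc, rfl⟩
  | cons x l ih => intro a b c h hc; exact ⟨h.1, ih x b c h.2 hc⟩

theorem pvIsPath_split (d : List (String × List String)) :
    ∀ l₁ l₂ a b, pvIsPath d a (l₁ ++ l₂) b → ∃ m, pvIsPath d a l₁ m ∧ pvIsPath d m l₂ b := by
  intro l₁
  induction l₁ with
  | nil => intro l₂ a b h; exact ⟨a, rfl, h⟩
  | cons x l ih =>
    intro l₂ a b h
    obtain ⟨m, h1, h2⟩ := ih l₂ x b h.2
    exact ⟨m, ⟨h.1, h1⟩, h2⟩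

theorem pvR_subset_succ (d : List (String × List String)) (t : Nat) (a : String) :
    pvR d t a ⊆ pvR d (t + 1) a := by
  intro x hx
  simp only [pvR, List.mem_dedup, List.mem_append]
  exact Or.inl hx

theorem pvR_complete (d : List (String × List String)) :
    ∀ t l a b, pvIsPath d a l b → l ≠ [] → l.length ≤ t + 1 → b ∈ pvR d t a := by
  intro t
  induction t with
  | zero =>
    intro l a b hp hne hlen
    match l, hne with
    | [x], _ =>
      obtain ⟨hx, hb⟩ := hp
      cases hb
      exact hx
    | x :: y :: l, _ => simp at hlen
  | succ t ih =>
    intro l a b hp hne hlen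
    by_cases hsm : l.length ≤ t + 1
    · exact pvR_subset_succ d t a (ih l a b hp hne hsm)
    · obtain ⟨l', y, rfl⟩ : ∃ l' y, l = l' ++ [y] := by
        rcases List.eq_nil_or_concat l with h | ⟨l', y, h⟩
        · exact absurd h hne
        · exact ⟨l', y, by simpa using h⟩
      obtain ⟨m, h1, h2⟩ := pvIsPath_split d l' [y] a b hp
      obtain ⟨hy, hb⟩ := h2
      cases hb
      have hl' : l'.length ≤ t + 1 := by
        have := hlen; simp at this ⊢; omega
      have hne' : l' ≠ [] := by
        intro h; subst h; simp at hsm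
      have hm : m ∈ pvR d t a := ih l' a m h1 hne' hl'
      simp only [pvR, List.mem_dedup, List.mem_append]
      right
      simp only [pvStep, List.mem_flatMap]
      exact ⟨m, hm, hy⟩

-- membership facts for pvGet
theorem pvGet_eq_none_iff (d : List (String × List String)) (n : String) :
    pvGet d n = none ↔ n ∉ d.map Prod.fst := by
  induction d with
  | nil => simp [pvGet, PySem.Dict.get?]
  | cons p d ih =>
    obtain ⟨k, v⟩ := p
    rw [pvGet, PySem.Dict.get?_mk_cons]
    by_cases hk : k = n
    · subst hk; simp
    · simp only [beq_iff_eq, hk, if_false]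
      rw [← pvGet]
      simp [ih, Ne.symm hk]

theorem pvGet_some_mem (d : List (String × List String)) (n : String) (cs : List String)
    (h : pvGet d n = some cs) : n ∈ d.map Prod.fst := by
  by_contra hmem
  rw [← pvGet_eq_none_iff] at hmem
  simp [hmem] at h

theorem pvGet_some_length (d : List (String × List String)) (n : String) (cs : List String)
    (h : pvGet d n = some cs) : cs.length ≤ pvM d := by
  induction d with
  | nil => simp [pvGet, PySem.Dict.get?] at h
  | cons p d ih =>
    obtain ⟨k, v⟩ := p
    rw [pvGet, PySem.Dict.get?_mk_cons] at h
    by_cases hk : (k == n) = true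
    · simp only [hk, if_true, Option.some.injEq] at h
      subst h
      simp [pvM]
    · simp only [hk, if_false] at h
      have := ih (by rw [pvGet]; exact h)
      simp only [pvM, List.map_cons, List.sum_cons] at *
      omega

-- from Pre_: every node on a repetition-free path from obj_from is safe
theorem pvSafe_of_path (d : List (String × List String)) (root : String)
    (hPre1 : root ∉ pvR d d.length root)
    (hPre2 : ∀ x ∈ pvR d d.length root, x ∉ pvR d d.length x) :
    ∀ j l n, pvIsPath d root l n → (root :: l).Nodup →
      (∀ x ∈ l, x ∈ d.map Prod.fst ∨ x = n) →
      d.length + 1 ≤ l.length + j → pvSafe d j n := by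
  intro j
  induction j with
  | zero =>
    intro l n hp hnd hkeys hlen
    show pvGet d n = none
    cases hget : pvGet d n with
    | none => rfl
    | some cs =>
      exfalso
      have hnk : n ∈ d.map Prod.fst := pvGet_some_mem d n cs hget
      have hsub : l ⊆ d.map Prod.fst := by
        intro x hx
        rcases hkeys x hx with h | h
        · exact h
        · subst h; exact hnk
      have : l.length ≤ d.length := by
        have := (List.subperm_of_subset (List.Nodup.of_cons hnd) hsub).length_le
        simpa using this
      omega
  | succ j ih =>
    intro l n hp hnd hkeys hlen
    intro c hc
    -- n is a key (it has a children entry)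
    have hget : ∃ cs, pvGet d n = some cs := by
      cases hget : pvGet d n with
      | none => simp [pvChildren, hget] at hc
      | some cs => exact ⟨cs, rfl⟩
    obtain ⟨cs, hget⟩ := hget
    have hnk : n ∈ d.map Prod.fst := pvGet_some_mem d n cs hget
    have hsub : l ⊆ d.map Prod.fst := by
      intro x hx
      rcases hkeys x hx with h | h
      · exact h
      · subst h; exact hnk
    have hlle : l.length ≤ d.length := by
      have := (List.subperm_of_subset (List.Nodup.of_cons hnd) hsub).length_le
      simpa using this
    -- c is a fresh node: otherwise a cycle reachable from root, contradicting Pre_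
    have hcnew : c ∉ root :: l := by
      intro hcl
      rcases List.mem_cons.mp hcl with hrfl | hcl
      · -- c = root: root lies on a cycle from itself
        subst hrfl
        have hcyc : pvIsPath d c (l ++ [c]) c := pvIsPath_snoc d l c n c hp hc
        have : c ∈ pvR d d.length c :=
          pvR_complete d d.length (l ++ [c]) c c hcyc (by simp) (by simp; omega)
        exact hPre1 this
      · -- c occurs in l: a cycle at c, and c is reachable from root
        obtain ⟨l₁, l₂, rfl⟩ := List.append_of_mem hcl
        obtain ⟨m, hm1, hm2⟩ := pvIsPath_split d l₁ (c :: l₂) root n hp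
        obtain ⟨hcm, hctail⟩ := hm2
        have hreach : c ∈ pvR d d.length root := by
          have : pvIsPath d root (l₁ ++ [c]) c := pvIsPath_snoc d l₁ root m c hm1 hcm
          refine pvR_complete d d.length (l₁ ++ [c]) root c this (by simp) ?_
          have : l₁.length ≤ (l₁ ++ c :: l₂).length := by simp
          simp
          omega
        have hcyc : c ∈ pvR d d.length c := by
          have hpath : pvIsPath d c (l₂ ++ [c]) c := pvIsPath_snoc d l₂ c n c hctail hc
          refine pvR_complete d d.length (l₂ ++ [c]) c c hpath (by simp) ?_
          have : l₂.length ≤ (l₁ ++ c :: l₂).length := by simp; omega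
          simp
          omega
        exact hPre2 c hreach hcyc
    -- extend the path and recurse
    refine ih (l ++ [c]) c (pvIsPath_snoc d l root n c hp hc) ?_ ?_ (by simp; omega)
    · have : (root :: l) ++ [c] = root :: (l ++ [c]) := by simp
      rw [← this]
      exact List.Nodup.append hnd (List.nodup_singleton c) (by
        intro x hx hxc
        simp at hxc
        subst hxc
        exact hcnew hx)
    · intro x hx
      rcases List.mem_append.mp hx with hx | hx
      · rcases hkeys x hx with h | h
        · exact Or.inl h
        · subst h; exact Or.inl hnk
      · simp at hx; subst hx; exact Or.inr rfl

theorem pvSafe_root (d : List (String × List String)) (root w : String)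
    (hPre : Pre_steps_to_child d root w) : pvSafe d (d.length + 1) root := by
  obtain ⟨h1, h2⟩ := hPre
  exact pvSafe_of_path d root h1 h2 (d.length + 1) [] root rfl (by simp) (by simp) (by simp)

-- ----- the B loop computes the same value -----

-- what the stack loop computes, entry by entry, in terms of A's (stabilised) recursion
def pvAltSpec (d : List (String × List String)) (w : String) : List (String × Int) → Int
  | [] => -1
  | (n, dist) :: rest =>
    if stepsA d w (d.length + 1) n = -1 then pvAltSpec d w rest
    else dist + stepsA d w (d.length + 1) n

theorem pvRevFoldl (dist : Int) :
    ∀ (cs : List String) (rest : List (String × Int)),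
      cs.reverse.foldl (fun st c => (c, dist + 1) :: st) rest =
        cs.map (fun c => (c, dist + 1)) ++ rest := by
  intro cs
  induction cs with
  | nil => intro rest; rfl
  | cons c cs ih =>
    intro rest
    simp only [List.reverse_cons, List.foldl_append, List.foldl_cons, List.foldl_nil, ih,
      List.map_cons, List.cons_append]

theorem pvAltSpec_children (d : List (String × List String)) (w : String) (dist : Int) :
    ∀ (cs : List String) (rest : List (String × Int)),
      pvAltSpec d w (cs.map (fun c => (c, dist + 1)) ++ rest) =
        (if stepsAFold d w (d.length + 1) cs = -1 then pvAltSpec d w rest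
         else dist + stepsAFold d w (d.length + 1) cs) := by
  intro cs
  induction cs with
  | nil => intro rest; simp [stepsAFold]
  | cons c cs ih =>
    intro rest
    simp only [List.map_cons, List.cons_append, pvAltSpec, stepsAFold]
    by_cases hc : stepsA d w (d.length + 1) c = -1
    · simp only [hc, if_true, ih rest]
      simp
    · have h1 : 1 ≤ stepsA d w (d.length + 1) c := by
        rcases stepsA_values d w (d.length + 1) c with h | h
        · exact absurd h hc
        · exact h
      simp only [hc, if_false, ne_eq, not_false_iff, if_true]
      have h2 : ¬ (1 + stepsA d w (d.length + 1) c = -1) := by omega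
      simp only [h2, if_false]
      omega

theorem pvLoopMain (d : List (String × List String)) (w : String) :
    ∀ F (gs : List (String × Int × Nat)),
      (∀ e ∈ gs, pvSafe d e.2.2 e.1 ∧ e.2.2 ≤ d.length + 1) →
      (gs.map (fun e => (pvM d + 1) ^ e.2.2)).sum ≤ F →
      stepsBLoop d w F (gs.map (fun e => (e.1, e.2.1))) =
        pvAltSpec d w (gs.map (fun e => (e.1, e.2.1))) := by
  intro F
  induction F with
  | zero =>
    intro gs hinv hF
    match gs with
    | [] => rfl
    | e :: gs =>
      exfalso
      simp only [List.map_cons, List.sum_cons, Nat.le_zero] at hF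
      have : 1 ≤ (pvM d + 1) ^ e.2.2 := Nat.one_le_pow _ _ (by omega)
      omega
  | succ F ih =>
    intro gs hinv hF
    match gs with
    | [] => rfl
    | ⟨n, dist, k⟩ :: gs =>
      obtain ⟨hsafe, hk⟩ := hinv ⟨n, dist, k⟩ (by simp)
      simp only [List.map_cons, List.sum_cons] at hF
      simp only [List.map_cons]
      rw [stepsBLoop]
      cases hget : pvGet d n with
      | none =>
        have hfn : stepsA d w (d.length + 1) n = -1 := by
          rw [stepsA_unfold_safe d w n (pvSafe_le d hk n hsafe), hget]
        rw [ih gs (fun e he => hinv e (by simp [he]))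
          (by have : 1 ≤ (pvM d + 1) ^ k := Nat.one_le_pow _ _ (by omega); omega)]
        simp [pvAltSpec, hfn]
      | some cs =>
        by_cases hw : w ∈ cs
        · simp only [hw, if_true]
          have hfn : stepsA d w (d.length + 1) n = 1 := by
            rw [stepsA_unfold_safe d w n (pvSafe_le d hk n hsafe), hget]
            simp [hw]
          simp [pvAltSpec, hfn]
        · simp only [hw, if_false]
          -- k = k' + 1 since n is a key
          obtain ⟨k', rfl⟩ : ∃ k', k = k' + 1 := by
            cases k with
            | zero => exact absurd hget (by simp only [pvSafe] at hsafe; simp [hsafe])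
            | succ k' => exact ⟨k', rfl⟩
          have hchild : ∀ c ∈ cs, pvSafe d k' c := fun c hc =>
            hsafe c (by simp [pvChildren, hget, hc])
          have hcsM : cs.length ≤ pvM d := pvGet_some_length d n cs hget
          -- the new ghost stack
          have hrw : cs.reverse.foldl (fun st c => (c, dist + 1) :: st)
              (gs.map (fun e => (e.1, e.2.1))) =
              ((cs.map (fun c => (c, dist + 1, k')) ++ gs).map (fun e => (e.1, e.2.1))) := by
            rw [pvRevFoldl]
            simp [List.map_map, Function.comp_def]
          rw [hrw]
          rw [ih (cs.map (fun c => (c, dist + 1, k')) ++ gs) ?inv ?fuel]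
          case inv =>
            intro e he
            rcases List.mem_append.mp he with he | he
            · obtain ⟨c, hc, rfl⟩ := List.mem_map.mp he
              refine ⟨hchild c hc, ?_⟩
              show k' ≤ d.length + 1
              have hk2 : k' + 1 ≤ d.length + 1 := hk
              omega
            · exact hinv e (by simp [he])
          case fuel =>
            have hx : 1 ≤ (pvM d + 1) ^ k' := Nat.one_le_pow _ _ (by omega)
            have hsum : ((cs.map (fun c => (c, dist + 1, k'))).map
                (fun e => (pvM d + 1) ^ e.2.2)).sum = cs.length * (pvM d + 1) ^ k' := by
              simp [List.map_map, Function.comp_def, List.map_const', List.sum_replicate,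
                smul_eq_mul]
            have hpow : (pvM d + 1) ^ (k' + 1) = (pvM d + 1) * (pvM d + 1) ^ k' := by ring
            have hb : cs.length * (pvM d + 1) ^ k' + 1 ≤ (pvM d + 1) ^ (k' + 1) := by
              rw [hpow]
              have : cs.length * (pvM d + 1) ^ k' + 1 ≤ pvM d * (pvM d + 1) ^ k' + (pvM d + 1) ^ k' := by
                have := Nat.mul_le_mul_right ((pvM d + 1) ^ k') hcsM
                omega
              calc cs.length * (pvM d + 1) ^ k' + 1 ≤ pvM d * (pvM d + 1) ^ k' + (pvM d + 1) ^ k' := this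
                _ = (pvM d + 1) * (pvM d + 1) ^ k' := by ring
            simp only [List.map_append, List.sum_append, hsum]
            omega
          -- rewrite both sides via the children characterisation
          have hmc : (cs.map (fun c => (c, dist + 1, k'))).map (fun e : String × Int × Nat => (e.1, e.2.1)) =
              cs.map (fun c => (c, dist + 1)) := by
            simp [List.map_map, Function.comp_def]
          rw [List.map_append, hmc, pvAltSpec_children]
          have hfn : stepsA d w (d.length + 1) n = stepsAFold d w (d.length + 1) cs := by
            rw [stepsA_unfold_safe d w n (pvSafe_le d hk n hsafe), hget]
            simp [hw]
          simp [pvAltSpec, hfn]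

-- ===== VERDICT (by name: the statement is the Claim_ definition above) =====
theorem steps_to_child_spec : Claim_equal_steps_to_child := by
  intro d root w _hDom hPre
  show steps_to_child d root w = steps_to_child_alt d root w
  have hsafe := pvSafe_root d root w hPre
  have h := pvLoopMain d w ((pvM d + 1) ^ (d.length + 1)) [⟨root, 0, d.length + 1⟩]
    (by intro e he; simp at he; subst he; exact ⟨hsafe, le_refl _⟩)
    (by simp)
  simp only [List.map_cons, List.map_nil] at h
  rw [steps_to_child_alt, h, steps_to_child]
  by_cases hz : stepsA d w (d.length + 1) root = -1
  · simp [pvAltSpec, hz]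
  · simp [pvAltSpec, hz]
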